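-- pv_equiv track=rewrite | github.com/kuiper616/MIT_psets | mitPsets/pset3/ps3d.py | constrainedMatchPair
-- ===== SOURCE A (Python) =====
-- def constrainedMatchPair(firstMatch,secondMatch,exactMatchArray):
--     n = []
--     for i in range(len(firstMatch)):
--         for j in range(len(secondMatch)):
--             if(firstMatch[i] in exactMatchArray):
--                 break
--             if(firstMatch[i] == secondMatch[j] + 2):
--                 n.append(firstMatch[i])
--     return tuple(n)
-- ===== SOURCE B (Python) =====
-- def constrainedMatchPair(firstMatch, secondMatch, exactMatchArray):
--     # Build a multiset (dict) of s+2 once, so the inner scan over secondMatch disappears.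
--     counts = {}
--     for s in secondMatch:
--         counts[s + 2] = counts.get(s + 2, 0) + 1
--     result = []
--     for f in firstMatch:
--         if f not in exactMatchArray:
--             result.extend([f] * counts.get(f, 0))
--     return tuple(result)
-- ===== Notes on version B (the rewrite author's own statement) =====
-- stated objective: faster
-- what changed: Replaces the nested index loops (rescanning secondMatch for every firstMatch element) by a dict of s+2 counts built once, then a single pass over firstMatch appending each non-excluded f count-many times.
import Mathlib
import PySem

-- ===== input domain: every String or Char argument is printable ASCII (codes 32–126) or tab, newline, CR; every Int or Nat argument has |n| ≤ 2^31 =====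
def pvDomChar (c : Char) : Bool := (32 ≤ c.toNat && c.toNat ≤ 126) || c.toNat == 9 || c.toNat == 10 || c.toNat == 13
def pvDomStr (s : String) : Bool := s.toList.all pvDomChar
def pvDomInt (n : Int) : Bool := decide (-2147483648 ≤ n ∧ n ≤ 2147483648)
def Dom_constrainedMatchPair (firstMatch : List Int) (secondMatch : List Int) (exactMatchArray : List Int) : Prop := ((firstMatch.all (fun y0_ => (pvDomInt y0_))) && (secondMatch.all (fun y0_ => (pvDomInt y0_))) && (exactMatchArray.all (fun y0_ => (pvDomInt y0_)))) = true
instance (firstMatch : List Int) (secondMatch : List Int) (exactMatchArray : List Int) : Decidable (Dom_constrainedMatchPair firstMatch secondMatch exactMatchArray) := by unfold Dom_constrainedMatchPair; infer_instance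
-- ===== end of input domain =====

-- B builds a dict of secondMatch-value+2 counts once and makes one pass over firstMatch,
-- removing A's inner rescan of secondMatch (objective: faster).

-- ===== PORT A =====
-- inner 'for j in range(len(secondMatch))' loop with its 'break' (f is firstMatch[i])
def pvInnerA (f : Int) (secondMatch : List Int) (exactMatchArray : List Int)
    (js : List Int) (n : List Int) : List Int :=
  match js with
  | [] => n
  | j :: rest =>
    if f ∈ exactMatchArray then n
    else pvInnerA f secondMatch exactMatchArray rest
      (if f = PySem.List.pyGetD secondMatch j 0 + 2 then n ++ [f] else n)

def constrainedMatchPair (firstMatch : List Int) (secondMatch : List Int) (exactMatchArray : List Int) : List Int :=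
  (PySem.List.pyRange 0 firstMatch.length 1).foldl
    (fun n i => pvInnerA (PySem.List.pyGetD firstMatch i 0) secondMatch exactMatchArray
      (PySem.List.pyRange 0 secondMatch.length 1) n) []

-- ===== PORT B =====
def constrainedMatchPair_alt (firstMatch : List Int) (secondMatch : List Int) (exactMatchArray : List Int) : List Int :=
  let counts : PySem.Dict Int Int :=
    secondMatch.foldl (fun d s => d.modify (s + 2) 0 (· + 1)) PySem.Dict.empty
  firstMatch.foldl
    (fun result f =>
      if f ∈ exactMatchArray then result
      else result ++ List.replicate (counts.getD f 0).toNat f) []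

-- ===== PRECONDITION & SPEC =====
def Spec_constrainedMatchPair (firstMatch : List Int) (secondMatch : List Int) (exactMatchArray : List Int) (out : List Int) : Prop := out = constrainedMatchPair_alt firstMatch secondMatch exactMatchArray
instance (firstMatch : List Int) (secondMatch : List Int) (exactMatchArray : List Int) (out : List Int) : Decidable (Spec_constrainedMatchPair firstMatch secondMatch exactMatchArray out) := by unfold Spec_constrainedMatchPair; infer_instance

-- ===== CLAIM (what is proved, stated in full; the proofs are below) =====
def Claim_equal_constrainedMatchPair : Prop := ∀ (firstMatch : List Int) (secondMatch : List Int) (exactMatchArray : List Int), Dom_constrainedMatchPair firstMatch secondMatch exactMatchArray → Spec_constrainedMatchPair firstMatch secondMatch exactMatchArray (constrainedMatchPair firstMatch secondMatch exactMatchArray)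

-- ===== LEMMAS AND PROOFS =====

-- the common value of both loop bodies, per firstMatch element
def pvBody (secondMatch exactMatchArray : List Int) (n : List Int) (f : Int) : List Int :=
  if f ∈ exactMatchArray then n else n ++ List.replicate (secondMatch.count (f - 2)) f

lemma pvInnerA_mem {f : Int} {sm ex js n : List Int} (h : f ∈ ex) :
    pvInnerA f sm ex js n = n := by
  cases js with
  | nil => rfl
  | cons j rest => simp [pvInnerA, h]

lemma pvInnerA_not_mem {f : Int} {sm ex : List Int} (h : f ∉ ex) (js n : List Int) :
    pvInnerA f sm ex js n =
      n ++ List.replicate (js.countP (fun j => f == PySem.List.pyGetD sm j 0 + 2)) f := by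
  induction js generalizing n with
  | nil => simp [pvInnerA]
  | cons j rest ih =>
    simp only [pvInnerA, h, if_false]
    rw [ih, List.countP_cons]
    by_cases hc : f = PySem.List.pyGetD sm j 0 + 2
    · simp [hc, List.replicate_succ, List.append_assoc]
    · simp [hc]

lemma countP_range_eq_count (f : Int) (sm : List Int) :
    (PySem.List.pyRange 0 (sm.length : Int) 1).countP (fun j => f == PySem.List.pyGetD sm j 0 + 2)
      = sm.count (f - 2) := by
  have hmap : (PySem.List.pyRange 0 (sm.length : Int) 1).countP
      (fun j => f == PySem.List.pyGetD sm j 0 + 2)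
      = ((PySem.List.pyRange 0 (sm.length : Int) 1).map
          (fun j => PySem.List.pyGetD sm j 0)).countP (fun v => f == v + 2) := by
    rw [List.countP_map]; rfl
  rw [hmap, PySem.List.map_pyGetD_pyRange_zero' sm 0, List.count_eq_countP]
  exact List.countP_congr (by intro v _; simp [beq_iff_eq]; omega)

lemma pvInnerA_eq_body (f : Int) (sm ex n : List Int) :
    pvInnerA f sm ex (PySem.List.pyRange 0 sm.length 1) n = pvBody sm ex n f := by
  by_cases h : f ∈ ex
  · simp [pvBody, h, pvInnerA_mem h]
  · rw [pvInnerA_not_mem h, pvBody, if_neg h, countP_range_eq_count]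

lemma counts_getD (sm : List Int) (f : Int) :
    ((sm.foldl (fun d s => d.modify (s + 2) 0 (· + 1)) (PySem.Dict.empty : PySem.Dict Int Int)).getD f 0).toNat
      = sm.count (f - 2) := by
  have h : sm.foldl (fun d s => d.modify (s + 2) 0 (· + 1)) (PySem.Dict.empty : PySem.Dict Int Int)
      = (sm.map (· + 2)).foldl (fun d x => d.modify x 0 (· + 1)) (PySem.Dict.empty : PySem.Dict Int Int) := by
    rw [List.foldl_map]
  rw [h, PySem.Dict.getD_foldl_modify_add_one]
  have hc : (sm.map (· + 2)).count f = sm.count (f - 2) := by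
    rw [List.count_eq_countP, List.countP_map, List.count_eq_countP]
    exact List.countP_congr (by intro v _; simp; omega)
  simp [hc]

-- ===== VERDICT (by name: the statement is the Claim_ definition above) =====
theorem constrainedMatchPair_spec : Claim_equal_constrainedMatchPair := by
  intro fm sm ex _
  show constrainedMatchPair fm sm ex = constrainedMatchPair_alt fm sm ex
  unfold constrainedMatchPair constrainedMatchPair_alt
  rw [PySem.List.foldl_pyRange_zero_pyGetD' fm 0
    (f := fun n f => pvInnerA f sm ex (PySem.List.pyRange 0 sm.length 1) n) (init := ([] : List Int))]
  simp only [pvInnerA_eq_body, pvBody, counts_getD]
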